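-- pv_equiv track=rewrite | github.com/timmychien/IRTM | pa2.py | create_dictionary
-- ===== SOURCE A (Python) =====
-- def create_dictionary(documents):
--     diction={}
--     dictionary=[]
--     for doc in documents:
--         for word in set(doc.split(' ')):
--             if word not in diction:
--                 diction[word]=1
--             else:diction[word]+=1
--     items=diction.items()
--     items=sorted(items)
--     for i in range(0,len(diction)):
--         dictionary.append([i+1,items[i]])
--     return dictionary
-- ===== SOURCE B (Python) =====
-- def create_dictionary(documents):
--     words = sorted(w for doc in documents for w in set(doc.split(' ')))
--     result = []
--     i = 0
--     rank = 0
--     n = len(words)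
--     while i < n:
--         j = i
--         while j < n and words[j] == words[i]:
--             j += 1
--         rank += 1
--         result.append([rank, (words[i], j - i)])
--         i = j
--     return result
-- ===== Notes on version B (the rewrite author's own statement) =====
-- stated objective: alternative
-- what changed: B replaces A's hash-map document-frequency counting followed by a full sort of the (word,count) items with flattening the per-document word sets, sorting the words once, and counting by grouping runs of equal words in a single pass while enumerating ranks on the fly.
import Mathlib
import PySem

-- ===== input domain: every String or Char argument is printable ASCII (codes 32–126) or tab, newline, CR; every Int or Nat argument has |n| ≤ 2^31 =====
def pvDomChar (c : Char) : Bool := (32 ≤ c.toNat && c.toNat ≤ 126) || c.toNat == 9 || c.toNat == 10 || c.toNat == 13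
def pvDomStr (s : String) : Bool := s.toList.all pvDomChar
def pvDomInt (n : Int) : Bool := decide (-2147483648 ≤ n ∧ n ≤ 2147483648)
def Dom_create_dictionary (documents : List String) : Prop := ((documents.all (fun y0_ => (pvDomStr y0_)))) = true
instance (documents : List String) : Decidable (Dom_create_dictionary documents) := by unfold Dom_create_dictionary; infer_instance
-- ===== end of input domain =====

-- B counts document-frequencies by sorting the flattened per-document word sets and grouping
-- runs of equal words in one pass, instead of A's dict counting followed by a sort (objective: alternative).

-- ===== PORT A =====
-- items[i] is always in range (i < len(items)); pyGetD's default is unreachable.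
def create_dictionary (documents : List String) : List (Int × (String × Int)) :=
  let diction := documents.foldl (fun d doc =>
    (PySem.Set.ofList ((PySem.Str.split? doc " ").getD [])).foldl
      (fun d word => if d.contains word then d.modify word 0 (· + 1) else d.insert word 1) d)
    PySem.Dict.empty
  let items := PySem.List.sorted2 diction.items (fun p => p.1) (fun p => p.2) false
  (PySem.List.pyRange 0 (diction.size : Int)).foldl
    (fun dictionary i => dictionary ++ [((i + 1 : Int), PySem.List.pyGetD items i ("", 0))]) []

-- ===== PORT B =====
def cdWords (documents : List String) : List String :=
  documents.flatMap (fun doc => PySem.Set.ofList ((PySem.Str.split? doc " ").getD []))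

-- the outer while loop of B: group a run of equal words, emit (rank, (word, run length)), continue
def cdGroup (words : List String) (rank : Int) : List (Int × (String × Int)) :=
  match words with
  | [] => []
  | w :: rest =>
    (rank + 1, (w, (1 + (rest.takeWhile (fun x => x == w)).length : Int))) ::
      cdGroup (rest.dropWhile (fun x => x == w)) (rank + 1)
termination_by words.length
decreasing_by
  simp only [List.length_cons]
  have h := (List.dropWhile_sublist (p := fun x => x == w) (l := rest)).length_le
  omega

def create_dictionary_alt (documents : List String) : List (Int × (String × Int)) :=
  cdGroup (PySem.List.sorted (cdWords documents) (fun w => w) false) 0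

-- ===== PRECONDITION & SPEC =====
def Spec_create_dictionary (documents : List String) (out : List (Int × (String × Int))) : Prop := out = create_dictionary_alt documents
instance (documents : List String) (out : List (Int × (String × Int))) : Decidable (Spec_create_dictionary documents out) := by unfold Spec_create_dictionary; infer_instance

-- ===== CLAIM (what is proved, stated in full; the proofs are below) =====
def Claim_equal_create_dictionary : Prop := ∀ (documents : List String), Dom_create_dictionary documents → Spec_create_dictionary documents (create_dictionary documents)

-- ===== LEMMAS AND PROOFS =====

-- enumerate(pairs, start = r): the common shape both programs produce
def enumFrom (r : Int) : List (String × Int) → List (Int × (String × Int))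
  | [] => []
  | x :: xs => (r, x) :: enumFrom (r + 1) xs

-- A's branching dict update is exactly the Counter update
lemma stepA_eq :
    (fun (d : PySem.Dict String Int) word =>
      if d.contains word then d.modify word 0 (· + 1) else d.insert word 1) =
    (fun (d : PySem.Dict String Int) word => d.modify word 0 (· + 1)) := by
  funext d word
  by_cases h : d.contains word
  · simp [h]
  · have h' : d.contains word = false := by simpa using h
    simp [h', PySem.Dict.modify, PySem.Dict.getD_of_not_contains d 0 h']

lemma dictionA_eq (documents : List String) :
    documents.foldl (fun d doc =>
      (PySem.Set.ofList ((PySem.Str.split? doc " ").getD [])).foldl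
        (fun d word => if d.contains word then d.modify word 0 (· + 1) else d.insert word 1) d)
      PySem.Dict.empty = PySem.Dict.counter (cdWords documents) := by
  rw [stepA_eq, ← List.foldl_flatMap, PySem.Dict.counter_eq_foldl]
  rfl

lemma insertBy_congr {α : Type} (b1 b2 : α → α → Bool) (x : α) (ys : List α)
    (h : ∀ y ∈ ys, b1 x y = b2 x y) :
    PySem.List.insertBy b1 x ys = PySem.List.insertBy b2 x ys := by
  induction ys with
  | nil => rfl
  | cons y ys ih =>
    have hy := h y (by simp)
    by_cases hb : b2 x y
    · simp [PySem.List.insertBy, hy, hb]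
    · simp [PySem.List.insertBy, hy, hb, ih (fun z hz => h z (by simp [hz]))]

lemma foldl_insertBy_congr {α : Type} (b1 b2 : α → α → Bool) (xs acc : List α)
    (h : ∀ a b : α, (a ∈ xs ∨ a ∈ acc) → (b ∈ xs ∨ b ∈ acc) → b1 a b = b2 a b) :
    xs.foldl (fun acc x => PySem.List.insertBy b1 x acc) acc =
    xs.foldl (fun acc x => PySem.List.insertBy b2 x acc) acc := by
  induction xs generalizing acc with
  | nil => rfl
  | cons x xs ih =>
    simp only [List.foldl_cons]
    rw [insertBy_congr b1 b2 x acc (fun y hy => h x y (Or.inl (by simp)) (Or.inr hy))]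
    apply ih
    intro a b ha hb
    apply h a b
    · rcases ha with h' | h'
      · exact Or.inl (by simp [h'])
      · rcases (PySem.List.insertBy_mem_iff b2 x a acc).1 h' with rfl | h''
        · exact Or.inl (by simp)
        · exact Or.inr h''
    · rcases hb with h' | h'
      · exact Or.inl (by simp [h'])
      · rcases (PySem.List.insertBy_mem_iff b2 x b acc).1 h' with rfl | h''
        · exact Or.inl (by simp)
        · exact Or.inr h''

-- sorted2 with a second key that is a function of the first key behaves like sorted by the first key
lemma sorted2_eq_sorted (xs : List (String × Int))
    (h : ∀ a ∈ xs, ∀ b ∈ xs, a.1 = b.1 → a.2 = b.2) :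
    PySem.List.sorted2 xs (fun p => p.1) (fun p => p.2) false =
    PySem.List.sorted xs (fun p => p.1) false := by
  simp only [PySem.List.sorted2, PySem.List.sorted]
  simp only [Bool.false_eq_true, if_false]
  apply foldl_insertBy_congr
  intro a b ha hb
  simp only [List.not_mem_nil, or_false] at ha hb
  rcases lt_trichotomy a.1 b.1 with hlt | heq | hgt
  · simp [hlt]
  · have h2 := h a ha b hb heq
    simp [heq, h2]
  · simp [hgt, asymm hgt]

-- the target list both programs produce (before enumeration)
def tgt (ws : List String) : List (String × Int) :=
  (PySem.List.sorted (PySem.Set.ofList ws) (fun x => x) false).map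
    (fun k => (k, (ws.count k : Int)))

lemma sortedA_eq (ws : List String) :
    PySem.List.sorted2 (PySem.Dict.counter ws).items (fun p => p.1) (fun p => p.2) false = tgt ws := by
  rw [PySem.Dict.items_counter]
  rw [sorted2_eq_sorted]
  · apply PySem.List.sorted_eq_of_perm_of_pairwise_lt
    · exact (PySem.List.sorted_perm (PySem.Set.ofList ws) (fun x => x) false).map _
    · have hp := PySem.List.sorted_ofList_pairwise_lt (xs := ws)
      unfold tgt
      rw [List.pairwise_map]
      exact hp
  · intro a ha b hb hab
    simp only [List.mem_map] at ha hb
    obtain ⟨k1, _, rfl⟩ := ha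
    obtain ⟨k2, _, rfl⟩ := hb
    simp only at hab
    subst hab
    rfl

lemma pyRange_nil (a b : Int) (h : b ≤ a) : PySem.List.pyRange a b = [] := by
  simp [PySem.List.pyRange, show ¬ a < b by omega]

lemma enumA (full : List (String × Int)) (a : Nat) (tl : List (String × Int))
    (h : full.drop a = tl) :
    (PySem.List.pyRange (a : Int) (full.length : Int)).map
      (fun i => ((i + 1 : Int), PySem.List.pyGetD full i ("", 0))) = enumFrom ((a : Int) + 1) tl := by
  induction tl generalizing a with
  | nil =>
    have hle : full.length ≤ a := List.drop_eq_nil_iff.1 h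
    rw [pyRange_nil _ _ (by exact_mod_cast hle)]
    rfl
  | cons x tl ih =>
    have hlt : a < full.length := by
      by_contra hc
      rw [List.drop_eq_nil_iff.2 (by omega)] at h
      exact (List.cons_ne_nil x tl) h.symm
    rw [PySem.List.pyRange_one_cons (by exact_mod_cast hlt)]
    have hx : full[a] :: full.drop (a + 1) = x :: tl := by
      rw [List.getElem_cons_drop hlt, h]
    have hx1 : full[a] = x := (List.cons.injEq _ _ _ _ ▸ hx).1
    have hx2 : full.drop (a + 1) = tl := (List.cons.injEq _ _ _ _ ▸ hx).2
    have ihh := ih (a + 1) hx2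
    have hx1' : PySem.List.pyGetD full (a : Int) ("", 0) = x := by
      simp [PySem.List.pyGetD_natCast, List.getD_eq_getElem?_getD, hlt, hx1]
    simp only [List.map_cons, enumFrom]
    push_cast at ihh
    rw [hx1', ihh]

lemma group_eq (l : List String) (r : Int) :
    l.Pairwise (· ≤ ·) → cdGroup l r = enumFrom (r + 1)
      ((PySem.List.sorted (PySem.Set.ofList l) (fun x => x) false).map
        (fun k => (k, (l.count k : Int)))) := by
  induction l, r using cdGroup.induct with
  | case1 r => intro _; simp only [cdGroup]; rfl
  | case2 r w rest ih =>
    intro hl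
    obtain ⟨hw, hrest⟩ := List.pairwise_cons.1 hl
    have hsplit : rest.takeWhile (fun x => x == w) ++ rest.dropWhile (fun x => x == w) = rest :=
      List.takeWhile_append_dropWhile
    have htkw : ∀ x ∈ rest.takeWhile (fun x => x == w), x = w := by
      intro x hx
      have := List.mem_takeWhile_imp hx
      exact eq_of_beq this
    have hdrpw : (rest.dropWhile (fun x => x == w)).Pairwise (· ≤ ·) :=
      hrest.sublist (List.dropWhile_sublist _)
    have hdrlt : ∀ x ∈ rest.dropWhile (fun x => x == w), w < x := by
      intro x hx
      cases hdr' : rest.dropWhile (fun x => x == w) with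
      | nil => rw [hdr'] at hx; exact absurd hx (List.not_mem_nil)
      | cons h0 t =>
        have hne : rest.dropWhile (fun x => x == w) ≠ [] := by rw [hdr']; simp
        have hh0 := List.head_dropWhile_not (fun x => x == w) hne
        have hh0e : (rest.dropWhile (fun x => x == w)).head hne = h0 := by
          simp [hdr']
        rw [hh0e] at hh0
        have hh0r : h0 ∈ rest := (List.dropWhile_sublist _).mem (by rw [hdr']; simp)
        have hh0w : w < h0 := lt_of_le_of_ne (hw h0 hh0r) (fun he => by simp [← he] at hh0)
        have hpair : (h0 :: t).Pairwise (· ≤ ·) := hdr' ▸ hdrpw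
        rw [hdr'] at hx
        rcases List.mem_cons.1 hx with rfl | hxt
        · exact hh0w
        · exact lt_of_lt_of_le hh0w ((List.pairwise_cons.1 hpair).1 x hxt)
    have hkey : PySem.List.sorted (PySem.Set.ofList (w :: rest)) (fun x => x) false
        = w :: PySem.List.sorted (PySem.Set.ofList (rest.dropWhile (fun x => x == w))) (fun x => x) false := by
      apply PySem.List.sorted_eq_of_perm_of_pairwise_lt
      · rw [List.perm_ext_iff_of_nodup]
        · intro a
          simp only [List.mem_cons, PySem.List.mem_sorted, PySem.Set.mem_ofList]
          constructor
          · rintro (rfl | h')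
            · exact Or.inl rfl
            · exact Or.inr (by rw [← hsplit]; exact List.mem_append_right _ h')
          · rintro (rfl | h')
            · exact Or.inl rfl
            · rw [← hsplit] at h'
              rcases List.mem_append.1 h' with h'' | h''
              · exact Or.inl (htkw _ h'')
              · exact Or.inr h''
        · rw [List.nodup_cons]
          constructor
          · intro hmem
            have : w ∈ rest.dropWhile (fun x => x == w) := by
              simpa [PySem.List.mem_sorted, PySem.Set.mem_ofList] using hmem
            exact absurd (hdrlt w this) (lt_irrefl w)
          · exact (PySem.List.sorted_perm _ _ _).nodup_iff.2 (PySem.Set.nodup_ofList _)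
        · exact PySem.Set.nodup_ofList _
      · rw [List.pairwise_cons]
        exact ⟨fun y hy => hdrlt y (by simpa [PySem.List.mem_sorted, PySem.Set.mem_ofList] using hy),
          PySem.List.sorted_ofList_pairwise_lt _⟩
    have hcw : (w :: rest).count w = (rest.takeWhile (fun x => x == w)).length + 1 := by
      conv_lhs => rw [← hsplit]
      rw [show w :: (rest.takeWhile (fun x => x == w) ++ rest.dropWhile (fun x => x == w))
            = (w :: rest.takeWhile (fun x => x == w)) ++ rest.dropWhile (fun x => x == w) by rfl]
      rw [List.count_append, List.count_cons_self,
        List.count_eq_length.2 (fun b hb => (htkw b hb).symm),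
        List.count_eq_zero.2 (fun hmem => absurd (hdrlt w hmem) (lt_irrefl w))]
    have hck : ∀ k ∈ PySem.List.sorted (PySem.Set.ofList (rest.dropWhile (fun x => x == w))) (fun x => x) false,
        (w :: rest).count k = (rest.dropWhile (fun x => x == w)).count k := by
      intro k hk
      have hkdr : k ∈ rest.dropWhile (fun x => x == w) := by
        simpa [PySem.List.mem_sorted, PySem.Set.mem_ofList] using hk
      have hkw : w ≠ k := ne_of_lt (hdrlt k hkdr)
      conv_lhs => rw [← hsplit]
      rw [List.count_cons, List.count_append,
        List.count_eq_zero.2 (fun hmem => hkw.symm (htkw k hmem)), if_neg (by simpa using hkw)]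
      ring
    rw [cdGroup, hkey, ih hdrpw]
    simp only [List.map_cons, enumFrom]
    congr 1
    · simp only [Prod.mk.injEq, true_and]
      rw [hcw]; push_cast; ring
    · congr 1
      exact List.map_congr_left (fun k hk => by rw [hck k hk])

lemma altB_eq (documents : List String) :
    create_dictionary_alt documents = enumFrom 1 (tgt (cdWords documents)) := by
  unfold create_dictionary_alt tgt
  rw [group_eq _ 0 (PySem.List.sorted_pairwise (cdWords documents) (fun w => w))]
  norm_num
  have h1 : PySem.List.sorted (PySem.Set.ofList (PySem.List.sorted (cdWords documents) (fun w => w) false)) (fun x => x) false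
      = PySem.List.sorted (PySem.Set.ofList (cdWords documents)) (fun x => x) false := by
    apply PySem.List.sorted_eq_sorted_of_perm _ _ _ (fun a b h => h)
    rw [List.perm_ext_iff_of_nodup (PySem.Set.nodup_ofList _) (PySem.Set.nodup_ofList _)]
    intro a
    simp [PySem.Set.mem_ofList, PySem.List.mem_sorted]
  rw [h1]
  apply congrArg
  apply List.map_congr_left
  intro k _
  rw [(PySem.List.sorted_perm (cdWords documents) (fun w => w) false).count_eq k]

-- ===== VERDICT (by name: the statement is the Claim_ definition above) =====
theorem create_dictionary_spec : Claim_equal_create_dictionary := by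
  intro documents _
  unfold Spec_create_dictionary
  rw [altB_eq]
  simp only [create_dictionary]
  rw [dictionA_eq, sortedA_eq]
  have hsize : ((PySem.Dict.counter (cdWords documents)).size : Int) = ((tgt (cdWords documents)).length : Int) := by
    simp [PySem.Dict.size, PySem.Dict.items_counter, tgt, PySem.List.length_sorted]
  rw [hsize, PySem.List.foldl_append_singleton_eq_map, List.nil_append]
  have h := enumA (tgt (cdWords documents)) 0 (tgt (cdWords documents)) (by simp)
  simpa using h
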